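-- pv_equiv track=rewrite | github.com/zVitorSantos/beira-app-envio | scripts/etiqueta.py | divide_por_volume
-- ===== SOURCE A (Python) =====
-- def divide_por_volume(quantidade, max_por_volume):
--     volumes = []
--     volumes_totais = -(-quantidade // max_por_volume)
--     for volume in range(1, int(volumes_totais) + 1):
--         if quantidade >= max_por_volume:
--             qtd = max_por_volume
--         else:
--             qtd = quantidade
--         volumes.append({'Volume': volume, 'Quantidade': qtd})
--         quantidade -= qtd
--     return volumes
-- ===== SOURCE B (Python) =====
-- def divide_por_volume(quantidade, max_por_volume):
--     n = int(-(-quantidade // max_por_volume))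
--     if n < 1:
--         return []
--     return [{'Volume': i, 'Quantidade': max_por_volume} for i in range(1, n)] + \
--            [{'Volume': n, 'Quantidade': quantidade - max_por_volume * (n - 1)}]
-- ===== Notes on version B (the rewrite author's own statement) =====
-- stated objective: simpler
-- what changed: B replaces A's loop with a running quantity accumulator and per-iteration if by a direct construction: n-1 full volumes emitted by a comprehension plus one closed-form final volume quantidade - max_por_volume*(n-1).
import Mathlib
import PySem

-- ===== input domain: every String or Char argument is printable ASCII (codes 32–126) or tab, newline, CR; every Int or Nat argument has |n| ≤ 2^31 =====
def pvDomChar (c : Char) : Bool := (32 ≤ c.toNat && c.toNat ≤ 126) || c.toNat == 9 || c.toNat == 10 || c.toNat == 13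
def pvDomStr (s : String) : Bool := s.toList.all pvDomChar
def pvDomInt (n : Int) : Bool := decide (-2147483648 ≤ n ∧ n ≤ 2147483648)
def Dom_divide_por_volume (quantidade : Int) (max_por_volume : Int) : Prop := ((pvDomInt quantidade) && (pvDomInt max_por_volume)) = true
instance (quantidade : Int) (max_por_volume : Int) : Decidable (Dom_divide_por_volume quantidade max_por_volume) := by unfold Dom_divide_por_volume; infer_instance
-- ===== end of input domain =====

-- B builds the volume list directly (n-1 full volumes by a comprehension, closed-form last volume)
-- instead of A's loop over a running quantity accumulator; same cost, simpler.

-- ===== PORT A =====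
def divide_por_volume (quantidade : Int) (max_por_volume : Int) : List (List (String × Int)) :=
  let volumes_totais : Int := -(PySem.Int.floordiv (-quantidade) max_por_volume)
  ((PySem.List.pyRange 1 (volumes_totais + 1) 1).foldl
    (fun (st : List (List (String × Int)) × Int) volume =>
      let qtd := if st.2 ≥ max_por_volume then max_por_volume else st.2
      (st.1 ++ [[("Volume", volume), ("Quantidade", qtd)]], st.2 - qtd))
    ([], quantidade)).1

-- ===== PORT B =====
def divide_por_volume_alt (quantidade : Int) (max_por_volume : Int) : List (List (String × Int)) :=
  let n : Int := -(PySem.Int.floordiv (-quantidade) max_por_volume)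
  if n < 1 then []
  else
    (PySem.List.pyRange 1 n 1).map (fun i => [("Volume", i), ("Quantidade", max_por_volume)])
      ++ [[("Volume", n), ("Quantidade", quantidade - max_por_volume * (n - 1))]]

-- ===== PRECONDITION & SPEC =====
-- Pre_ excludes max_por_volume = 0, where A raises ZeroDivisionError, and a negative
-- max_por_volume together with a negative quantidade: a negative volume capacity is a
-- corner no caller would specify, and there A's first-chunk-takes-all split and B's
-- even split are equally accidental values.
def Pre_divide_por_volume (quantidade : Int) (max_por_volume : Int) : Prop :=
  max_por_volume ≠ 0 ∧ ¬(quantidade < 0 ∧ max_por_volume < 0)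
instance (quantidade : Int) (max_por_volume : Int) : Decidable (Pre_divide_por_volume quantidade max_por_volume) := by unfold Pre_divide_por_volume; infer_instance

def pvWitness_divide_por_volume : Int × Int := (7, 3)

def Spec_divide_por_volume (quantidade : Int) (max_por_volume : Int) (out : List (List (String × Int))) : Prop := out = divide_por_volume_alt quantidade max_por_volume
instance (quantidade : Int) (max_por_volume : Int) (out : List (List (String × Int))) : Decidable (Spec_divide_por_volume quantidade max_por_volume out) := by unfold Spec_divide_por_volume; infer_instance

-- ===== CLAIM (what is proved, stated in full; the proofs are below) =====
def Claim_equal_divide_por_volume : Prop := ∀ (quantidade : Int) (max_por_volume : Int), Dom_divide_por_volume quantidade max_por_volume → Pre_divide_por_volume quantidade max_por_volume → Spec_divide_por_volume quantidade max_por_volume (divide_por_volume quantidade max_por_volume)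

-- ===== LEMMAS AND PROOFS =====

-- Loop invariant for A's fold when the divisor m is positive: starting with quantity q
-- needing exactly k ≥ 1 volumes, the fold emits k-1 full volumes and a closed-form last one,
-- finishing with quantity 0.
lemma divide_loop_inv (m : Int) (hm : 0 < m) :
    ∀ (k : Nat) (q v : Int) (acc : List (List (String × Int))),
      (k : Int) * m - m < q → q ≤ (k : Int) * m → 1 ≤ k →
      (PySem.List.pyRange v (v + k) 1).foldl
        (fun (st : List (List (String × Int)) × Int) volume =>
          let qtd := if st.2 ≥ m then m else st.2
          (st.1 ++ [[("Volume", volume), ("Quantidade", qtd)]], st.2 - qtd))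
        (acc, q)
      = (acc ++ (PySem.List.pyRange v (v + k - 1) 1).map
            (fun i => [("Volume", i), ("Quantidade", m)])
          ++ [[("Volume", v + (k : Int) - 1), ("Quantidade", q - m * ((k : Int) - 1))]], 0) := by
  intro k
  induction k with
  | zero => intro q v acc _ _ h1; omega
  | succ k ih =>
    intro q v acc hlo hhi _
    by_cases hk : 1 ≤ k
    · -- more than one volume remains: first iteration takes a full m
      have hqm : q ≥ m := by
        have : (1 : Int) ≤ (k : Int) := by exact_mod_cast hk
        push_cast at hlo
        nlinarith
      have hcons : PySem.List.pyRange v (v + (k + 1 : Nat)) 1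
          = v :: PySem.List.pyRange (v + 1) (v + (k + 1 : Nat)) 1 := by
        apply PySem.List.pyRange_one_cons
        push_cast; omega
      rw [hcons]
      simp only [List.foldl_cons, if_pos hqm]
      have hrec := ih (q - m) (v + 1) (acc ++ [[("Volume", v), ("Quantidade", m)]])
        (by push_cast at hlo ⊢; nlinarith) (by push_cast at hhi ⊢; nlinarith) hk
      have harg : v + 1 + (k : Int) = v + ((k : Nat) + 1 : Nat) := by push_cast; ring
      rw [harg] at hrec
      rw [hrec]
      have hcons2 : PySem.List.pyRange v (v + ((k : Nat) + 1 : Nat) - 1) 1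
          = v :: PySem.List.pyRange (v + 1) (v + 1 + (k : Int) - 1) 1 := by
        rw [show v + ((k : Nat) + 1 : Nat) - 1 = v + (k : Int) by push_cast; ring,
            show v + 1 + (k : Int) - 1 = v + (k : Int) by ring]
        apply PySem.List.pyRange_one_cons
        have : (1 : Int) ≤ (k : Int) := by exact_mod_cast hk
        omega
      rw [show v + 1 + (k : Int) - 1 = v + ((k : Nat) + 1 : Nat) - 1 by push_cast; ring] at hcons2
      rw [hcons2]
      simp only [List.map_cons, List.append_assoc, List.cons_append, List.nil_append]
      rw [show q - m - m * ((k : Int) - 1) = q - m * ((((k : Nat) + 1 : Nat) : Int) - 1) by push_cast; ring]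
    · -- last volume: k = 0, exactly one iteration remains
      have hk0 : k = 0 := by omega
      subst hk0
      have h1 : PySem.List.pyRange v (v + (1 : Nat)) 1 = [v] := by
        push_cast
        exact PySem.List.pyRange_one_singleton v
      have h2 : PySem.List.pyRange v (v + (1 : Nat) - 1) 1 = [] := by
        apply PySem.List.pyRange_one_eq_nil; push_cast; omega
      rw [h1, h2]
      push_cast at hlo hhi ⊢
      simp only [List.foldl_cons, List.foldl_nil, List.map_nil,
        List.append_nil]
      split_ifs with hq
      · have : q = m := by omega
        subst this
        norm_num
      · norm_num

-- ===== VERDICT (by name: the statement is the Claim_ definition above) =====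
theorem divide_por_volume_spec : Claim_equal_divide_por_volume := by
  intro q m _ hpre
  obtain ⟨hm0, hnn⟩ := hpre
  unfold Spec_divide_por_volume divide_por_volume divide_por_volume_alt
  dsimp only
  by_cases hm : 0 < m
  · -- positive divisor
    set n : Int := -(PySem.Int.floordiv (-q) m) with hn
    have hbounds : (n - 1) * m < q ∧ q ≤ n * m :=
      (PySem.Int.neg_floordiv_neg_eq_iff_of_pos hm).mp hn.symm
    by_cases hq : 0 < q
    · have hn1 : 1 ≤ n := by nlinarith [hbounds.1, hbounds.2]
      have hk : ((n.toNat : Int)) = n := Int.toNat_of_nonneg (by omega)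
      have hinv := divide_loop_inv m hm n.toNat q 1 []
        (by rw [hk]; nlinarith [hbounds.1]) (by rw [hk]; exact hbounds.2)
        (by omega)
      rw [show (1 : Int) + (n.toNat : Int) = n + 1 by omega] at hinv
      rw [hinv]
      rw [if_neg (by omega)]
      simp only [List.nil_append, hk]
      rw [show n + 1 - 1 = n by ring]
    · -- q ≤ 0: n ≤ 0, both sides empty
      have hn0 : n < 1 := by nlinarith [hbounds.1]
      rw [if_pos hn0]
      rw [PySem.List.pyRange_one_eq_nil (by omega)]
      simp
  · -- negative divisor (Pre_ forces 0 ≤ q): n ≤ 0, both sides empty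
    have hmneg : m < 0 := by omega
    have hq0 : 0 ≤ q := by omega
    set n : Int := -(PySem.Int.floordiv (-q) m) with hn
    have hfd : PySem.Int.floordiv (-q) m = PySem.Int.floordiv q (-m) := by
      have h := PySem.Int.floordiv_neg_neg q (-m)
      simpa using h
    have hnn' : 0 ≤ PySem.Int.floordiv q (-m) := by
      have := (PySem.Int.le_floordiv_iff_mul_le (a := q) (b := -m) (q := 0) (by omega)).mpr (by omega)
      omega
    have hn0 : n < 1 := by rw [hn, hfd]; omega
    rw [if_pos hn0]
    have : PySem.List.pyRange 1 (n + 1) 1 = [] :=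
      PySem.List.pyRange_one_eq_nil (by omega)
    rw [this]
    simp
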